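-- pv_equiv track=rewrite | github.com/emrecelik95/CSE321-Homeworks | HW2/findRottenWalnut[141044024].py | indexOfRottenWalnut
-- ===== SOURCE A (Python) =====
-- def compareScales (leftScaleList, rightScaleList):
-- 	result = sum(leftScaleList) - sum(rightScaleList)
-- 	if result < 0:
-- 		return 1
-- 	elif result > 0:
-- 		return -1
-- 	else:
-- 		return 0
--
-- def indexOfRottenWalnut(wList):
--         size = len(wList)
--         result = 0
--
--         if(size == 1):
--                 return 0
--         if(size == 2):
--                 return 0 if (compareScales(wList[0:size//2],wList[size//2:size]) == 1) else 1
--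
--
--         if(size % 2 == 0):
--                 result = compareScales(wList[0:size//2],wList[size//2:size])
--         else:
--                 result = compareScales(wList[0:size//2],wList[size//2 + 1:size])
--
--
--         if (result == 1):
--                 return indexOfRottenWalnut(wList[0:size//2])
--         elif (result == -1):
--                 return size//2 + indexOfRottenWalnut(wList[size//2:])
--
--         else:
--                 return size//2
-- ===== SOURCE B (Python) =====
-- def indexOfRottenWalnut(wList):
--     # Iterative binary search over a window (lo, hi) of the original list,
--     # carrying the accumulated offset instead of slicing and recursing.
--     lo, hi, offset = 0, len(wList), 0
--     while True:
--         size = hi - lo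
--         if size <= 1:
--             return offset
--         if size == 2:
--             return offset if wList[lo] < wList[lo + 1] else offset + 1
--         half = size // 2
--         mid = lo + half
--         left = sum(wList[lo:mid])
--         right = sum(wList[mid:hi]) if size % 2 == 0 else sum(wList[mid + 1:hi])
--         if left < right:
--             hi = mid
--         elif left > right:
--             offset += half
--             lo = mid
--         else:
--             return offset + half
-- ===== Notes on version B (the rewrite author's own statement) =====
-- stated objective: alternative
-- what changed: Replaces A's slice-and-recurse divide-and-conquer (which builds a new sublist at every level) with an iterative loop maintaining a (lo, hi) window into the original list plus an accumulated offset, so no intermediate lists are constructed.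
import Mathlib
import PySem

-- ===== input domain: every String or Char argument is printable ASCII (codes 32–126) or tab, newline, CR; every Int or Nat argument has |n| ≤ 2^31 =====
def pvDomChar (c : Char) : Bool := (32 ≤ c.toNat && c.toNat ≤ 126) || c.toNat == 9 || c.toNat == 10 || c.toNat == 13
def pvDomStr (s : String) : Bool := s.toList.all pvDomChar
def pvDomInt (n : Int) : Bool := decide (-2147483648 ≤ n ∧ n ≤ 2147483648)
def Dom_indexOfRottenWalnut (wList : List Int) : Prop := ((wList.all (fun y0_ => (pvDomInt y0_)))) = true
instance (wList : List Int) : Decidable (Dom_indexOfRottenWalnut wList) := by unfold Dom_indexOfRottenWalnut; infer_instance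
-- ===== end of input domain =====

-- B replaces A's slice-and-recurse divide&conquer with an iterative window (lo, hi) plus an
-- accumulated offset over the ORIGINAL list (no intermediate slice lists): objective "alternative".

-- ===== PORT A =====
-- Termination facts for the ports (named so the recursive definitions cite them compactly).
theorem pvDecSliceHalf (w : List Int) (h0 : w.length ≠ 0) :
    (PySem.List.slice w (some 0) (some ((w.length / 2 : Nat) : Int))).length < w.length := by
  simp only [PySem.List.length_slice, PySem.List.clampIdx]
  split_ifs <;> omega

theorem pvDecSliceRest (w : List Int) (h1 : w.length ≠ 1) (h0 : w.length ≠ 0) :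
    (PySem.List.slice w (some ((w.length / 2 : Nat) : Int)) none).length < w.length := by
  rw [PySem.List.slice_some_none, PySem.List.clampIdx_natCast]
  simp only [List.length_drop]
  omega

theorem pvDecWinLeft (lo hi : Nat) (h : ¬ hi - lo ≤ 1) : lo + (hi - lo) / 2 - lo < hi - lo := by
  omega

theorem pvDecWinRight (lo hi : Nat) (h : ¬ hi - lo ≤ 1) : hi - (lo + (hi - lo) / 2) < hi - lo := by
  omega

def compareScales (leftScaleList rightScaleList : List Int) : Int :=
  let result := leftScaleList.sum - rightScaleList.sum
  if result < 0 then 1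
  else if result > 0 then -1
  else 0

def indexOfRottenWalnut (wList : List Int) : Int :=
  let size := wList.length
  if size = 1 then 0
  else if size = 2 then
    (if compareScales (PySem.List.slice wList (some 0) (some ((size / 2 : Nat) : Int)))
                      (PySem.List.slice wList (some ((size / 2 : Nat) : Int)) (some (size : Int))) = 1
     then 0 else 1)
  else
    let result :=
      if size % 2 = 0 then
        compareScales (PySem.List.slice wList (some 0) (some ((size / 2 : Nat) : Int)))
                      (PySem.List.slice wList (some ((size / 2 : Nat) : Int)) (some (size : Int)))
      else
        compareScales (PySem.List.slice wList (some 0) (some ((size / 2 : Nat) : Int)))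
                      (PySem.List.slice wList (some ((size / 2 + 1 : Nat) : Int)) (some (size : Int)))
    if result = 1 then
      indexOfRottenWalnut (PySem.List.slice wList (some 0) (some ((size / 2 : Nat) : Int)))
    else if result = -1 then
      ((size / 2 : Nat) : Int) +
        indexOfRottenWalnut (PySem.List.slice wList (some ((size / 2 : Nat) : Int)) none)
    else ((size / 2 : Nat) : Int)
termination_by wList.length
decreasing_by
  · rename_i h1 h2 hr
    refine pvDecSliceHalf wList (fun h0 => ?_)
    rw [List.length_eq_zero_iff] at h0
    subst h0
    exact absurd hr (by decide)
  · rename_i h1 h2 _hne hr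
    refine pvDecSliceRest wList h1 (fun h0 => ?_)
    rw [List.length_eq_zero_iff] at h0
    subst h0
    exact absurd hr (by decide)

-- ===== PORT B =====
def walnutLoop (wList : List Int) (lo hi offset : Nat) : Int :=
  let size := hi - lo
  if size ≤ 1 then (offset : Int)
  else if size = 2 then
    (if PySem.List.pyGetD wList (lo : Int) 0 < PySem.List.pyGetD wList ((lo : Int) + 1) 0
     then (offset : Int) else (offset : Int) + 1)
  else
    let half := size / 2
    let mid := lo + half
    let left := (PySem.List.slice wList (some (lo : Int)) (some (mid : Int))).sum
    let right :=
      if size % 2 = 0 then (PySem.List.slice wList (some (mid : Int)) (some (hi : Int))).sum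
      else (PySem.List.slice wList (some ((mid : Int) + 1)) (some (hi : Int))).sum
    if left < right then walnutLoop wList lo mid offset
    else if left > right then walnutLoop wList mid hi (offset + half)
    else (offset : Int) + half
termination_by hi - lo
decreasing_by
  · rename_i hle _h2 _hlt
    exact pvDecWinLeft lo hi hle
  · rename_i hle _h2 _hnlt _hgt
    exact pvDecWinRight lo hi hle

def indexOfRottenWalnut_alt (wList : List Int) : Int :=
  walnutLoop wList 0 wList.length 0

-- ===== PRECONDITION & SPEC =====
def Spec_indexOfRottenWalnut (wList : List Int) (out : Int) : Prop := out = indexOfRottenWalnut_alt wList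
instance (wList : List Int) (out : Int) : Decidable (Spec_indexOfRottenWalnut wList out) := by unfold Spec_indexOfRottenWalnut; infer_instance

-- ===== CLAIM (what is proved, stated in full; the proofs are below) =====
def Claim_equal_indexOfRottenWalnut : Prop := ∀ (wList : List Int), Dom_indexOfRottenWalnut wList → Spec_indexOfRottenWalnut wList (indexOfRottenWalnut wList)

-- ===== LEMMAS AND PROOFS =====

theorem A_nil : indexOfRottenWalnut [] = 0 := by
  rw [indexOfRottenWalnut]; norm_num [compareScales]

theorem A_one (w : List Int) (h : w.length = 1) : indexOfRottenWalnut w = 0 := by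
  rw [indexOfRottenWalnut]; simp [h]

theorem compare_lt (L R : List Int) (h : L.sum < R.sum) : compareScales L R = 1 := by
  unfold compareScales; rw [if_pos (by omega)]

theorem compare_gt (L R : List Int) (h : R.sum < L.sum) : compareScales L R = -1 := by
  unfold compareScales; rw [if_neg (by omega), if_pos (by omega)]

theorem compare_same (L R : List Int) (h : L.sum = R.sum) : compareScales L R = 0 := by
  unfold compareScales; rw [if_neg (by omega), if_neg (by omega)]
theorem A_two (a b : Int) : indexOfRottenWalnut [a, b] = if a < b then 0 else 1 := by
  rw [indexOfRottenWalnut]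
  norm_num [PySem.List.slice_toNat, show ((2:Int)).toNat = 2 from rfl]
  rcases lt_trichotomy a b with h | h | h
  · rw [compare_lt _ _ (by simpa using h), if_pos rfl, if_pos h]
  · rw [compare_same _ _ (by simpa using h), if_neg (by norm_num), if_neg (not_lt.mpr (le_of_eq h.symm))]
  · rw [compare_gt _ _ (by simpa using h), if_neg (by norm_num), if_neg (not_lt.mpr (le_of_lt h))]

theorem sub_two (w : List Int) (lo hi : Nat) (hhi : hi ≤ w.length) (h2 : hi - lo = 2) :
    (w.drop lo).take (hi - lo) = [w.getD lo 0, w.getD (lo + 1) 0] := by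
  have hlo : lo + 2 ≤ w.length := by omega
  rw [h2, List.getD_eq_getElem _ _ (by omega), List.getD_eq_getElem _ _ (by omega)]
  apply List.ext_getElem (by simp; omega)
  intro i hi1 hi2
  simp only [List.length_cons, List.length_nil] at hi2
  have hi3 : i < 2 := by omega
  interval_cases i <;> simp [List.getElem_take, List.getElem_drop]

-- A, unfolded once on the window (w.drop lo).take (hi - lo), expressed in B's window terms.
theorem A_window (w : List Int) (lo hi : Nat) (hhi : hi ≤ w.length) (h3 : 3 ≤ hi - lo) :
    indexOfRottenWalnut ((w.drop lo).take (hi - lo)) =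
      (if (PySem.List.slice w (some (lo : Int)) (some ((lo + (hi - lo) / 2 : Nat) : Int))).sum <
          (if (hi - lo) % 2 = 0
           then (PySem.List.slice w (some ((lo + (hi - lo) / 2 : Nat) : Int)) (some (hi : Int))).sum
           else (PySem.List.slice w (some (((lo + (hi - lo) / 2 : Nat) : Int) + 1)) (some (hi : Int))).sum)
       then indexOfRottenWalnut ((w.drop lo).take ((hi - lo) / 2))
       else if (if (hi - lo) % 2 = 0
           then (PySem.List.slice w (some ((lo + (hi - lo) / 2 : Nat) : Int)) (some (hi : Int))).sum
           else (PySem.List.slice w (some (((lo + (hi - lo) / 2 : Nat) : Int) + 1)) (some (hi : Int))).sum) <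
          (PySem.List.slice w (some (lo : Int)) (some ((lo + (hi - lo) / 2 : Nat) : Int))).sum
       then (((hi - lo) / 2 : Nat) : Int) +
            indexOfRottenWalnut ((w.drop (lo + (hi - lo) / 2)).take (hi - (lo + (hi - lo) / 2)))
       else (((hi - lo) / 2 : Nat) : Int)) := by
  have hlen : ((w.drop lo).take (hi - lo)).length = hi - lo := by simp; omega
  have hA1 : PySem.List.slice ((w.drop lo).take (hi - lo)) (some 0) (some (((hi - lo) / 2 : Nat) : Int))
      = (w.drop lo).take ((hi - lo) / 2) := by
    rw [PySem.List.slice_toNat _ (by norm_num) (Int.natCast_nonneg _)]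
    simp only [Int.toNat_natCast, Int.toNat_zero, Nat.sub_zero, List.drop_zero, List.take_take]
    congr 1; omega
  have hA2 : PySem.List.slice ((w.drop lo).take (hi - lo)) (some (((hi - lo) / 2 : Nat) : Int)) (some ((hi - lo : Nat) : Int))
      = (w.drop (lo + (hi - lo) / 2)).take (hi - (lo + (hi - lo) / 2)) := by
    rw [PySem.List.slice_toNat _ (Int.natCast_nonneg _) (Int.natCast_nonneg _)]
    simp only [Int.toNat_natCast]
    rw [List.drop_take, List.drop_drop, List.take_take]
    simp only [min_self]
    congr 1; omega
  have hA3 : PySem.List.slice ((w.drop lo).take (hi - lo)) (some (((hi - lo) / 2 + 1 : Nat) : Int)) (some ((hi - lo : Nat) : Int))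
      = (w.drop (lo + (hi - lo) / 2 + 1)).take (hi - (lo + (hi - lo) / 2 + 1)) := by
    rw [PySem.List.slice_toNat _ (Int.natCast_nonneg _) (Int.natCast_nonneg _)]
    simp only [Int.toNat_natCast]
    rw [List.drop_take, List.drop_drop, List.take_take]
    simp only [min_self]
    congr 1; omega
  have hA4 : PySem.List.slice ((w.drop lo).take (hi - lo)) (some (((hi - lo) / 2 : Nat) : Int)) none
      = (w.drop (lo + (hi - lo) / 2)).take (hi - (lo + (hi - lo) / 2)) := by
    rw [PySem.List.slice_some_none, PySem.List.clampIdx_natCast, hlen]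
    rw [show min ((hi - lo) / 2) (hi - lo) = (hi - lo) / 2 from by omega]
    rw [List.drop_take, List.drop_drop]
    congr 1; omega
  have hB1 : PySem.List.slice w (some (lo : Int)) (some ((lo + (hi - lo) / 2 : Nat) : Int))
      = (w.drop lo).take ((hi - lo) / 2) := by
    rw [PySem.List.slice_toNat _ (Int.natCast_nonneg _) (Int.natCast_nonneg _)]
    simp only [Int.toNat_natCast]
    congr 1; omega
  have hB2 : PySem.List.slice w (some ((lo + (hi - lo) / 2 : Nat) : Int)) (some ((hi : Nat) : Int))
      = (w.drop (lo + (hi - lo) / 2)).take (hi - (lo + (hi - lo) / 2)) := by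
    rw [PySem.List.slice_toNat _ (Int.natCast_nonneg _) (Int.natCast_nonneg _)]
    simp only [Int.toNat_natCast]
  have hB3 : PySem.List.slice w (some (((lo + (hi - lo) / 2 : Nat) : Int) + 1)) (some ((hi : Nat) : Int))
      = (w.drop (lo + (hi - lo) / 2 + 1)).take (hi - (lo + (hi - lo) / 2 + 1)) := by
    rw [show (((lo + (hi - lo) / 2 : Nat) : Int) + 1) = ((lo + (hi - lo) / 2 + 1 : Nat) : Int) from by push_cast; ring]
    rw [PySem.List.slice_toNat _ (Int.natCast_nonneg _) (Int.natCast_nonneg _)]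
    simp only [Int.toNat_natCast]
  rw [indexOfRottenWalnut]
  simp only [hlen, hB1, hB2, hB3, hA1, hA2, hA3, hA4]
  rw [if_neg (by omega), if_neg (by omega)]
  by_cases hp : (hi - lo) % 2 = 0
  · simp only [hp, if_true]
    rcases lt_trichotomy ((w.drop lo).take ((hi - lo) / 2)).sum
        ((w.drop (lo + (hi - lo) / 2)).take (hi - (lo + (hi - lo) / 2))).sum with h | h | h
    · rw [compare_lt _ _ h, if_pos rfl, if_pos h]
    · rw [compare_same _ _ h]
      simp [h]
    · rw [compare_gt _ _ h, if_neg (by norm_num), if_pos rfl, if_neg (asymm h), if_pos h]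
  · simp only [hp, if_false]
    rcases lt_trichotomy ((w.drop lo).take ((hi - lo) / 2)).sum
        ((w.drop (lo + (hi - lo) / 2 + 1)).take (hi - (lo + (hi - lo) / 2 + 1))).sum with h | h | h
    · rw [compare_lt _ _ h, if_pos rfl, if_pos h]
    · rw [compare_same _ _ h]
      simp [h]
    · rw [compare_gt _ _ h, if_neg (by norm_num), if_pos rfl, if_neg (asymm h), if_pos h]

-- The loop on a window (lo, hi) computes offset + A's answer on that window's sublist.
theorem walnutLoop_eq (w : List Int) (lo hi offset : Nat) :
    hi ≤ w.length →
    walnutLoop w lo hi offset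
      = (offset : Int) + indexOfRottenWalnut ((w.drop lo).take (hi - lo)) := by
  induction lo, hi, offset using walnutLoop.induct w with
  | case1 lo hi offset size hle =>
    intro hhi
    simp only [size] at hle
    rw [walnutLoop, if_pos hle]
    by_cases h0 : hi - lo = 0
    · rw [h0, List.take_zero, A_nil]; norm_num
    · rw [A_one _ (by simp; omega)]; norm_num
  | case2 lo hi offset size hle h2 hlt =>
    intro hhi
    simp only [size] at hle h2
    rw [walnutLoop, if_neg hle, if_pos h2, if_pos hlt]
    rw [sub_two w lo hi hhi h2, A_two]
    rw [if_pos (by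
      rw [PySem.List.pyGetD_natCast,
        show ((lo : Int) + 1) = ((lo + 1 : Nat) : Int) from by push_cast; ring,
        PySem.List.pyGetD_natCast] at hlt
      exact hlt)]
    norm_num
  | case3 lo hi offset size hle h2 hlt =>
    intro hhi
    simp only [size] at hle h2
    rw [walnutLoop, if_neg hle, if_pos h2, if_neg hlt]
    rw [sub_two w lo hi hhi h2, A_two]
    rw [if_neg (by
      rw [PySem.List.pyGetD_natCast,
        show ((lo : Int) + 1) = ((lo + 1 : Nat) : Int) from by push_cast; ring,
        PySem.List.pyGetD_natCast] at hlt
      exact hlt)]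
  | case4 lo hi offset size hle h2 half mid left right hlr ih =>
    intro hhi
    simp only [size] at hle h2
    by_cases hp : (hi - lo) % 2 = 0 <;>
    [ simp only [size, half, mid, left, right, hp, dite_true] at hlr ih;
      simp only [size, half, mid, left, right, hp, dite_false] at hlr ih ] <;>
    · rw [walnutLoop, if_neg hle, if_neg h2]
      simp only [hp, ite_true, ite_false]
      rw [if_pos hlr, ih (by omega), A_window w lo hi hhi (by omega)]
      simp only [hp, ite_true, ite_false]
      rw [if_pos hlr]
      rw [show lo + (hi - lo) / 2 - lo = (hi - lo) / 2 from by omega]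
  | case5 lo hi offset size hle h2 half mid left right hnlt hgt ih =>
    intro hhi
    simp only [size] at hle h2
    by_cases hp : (hi - lo) % 2 = 0 <;>
    [ simp only [size, half, mid, left, right, hp, dite_true] at hnlt hgt ih;
      simp only [size, half, mid, left, right, hp, dite_false] at hnlt hgt ih ] <;>
    · rw [walnutLoop, if_neg hle, if_neg h2]
      simp only [hp, ite_true, ite_false]
      rw [if_neg hnlt, if_pos hgt, ih (by omega), A_window w lo hi hhi (by omega)]
      simp only [hp, ite_true, ite_false]
      rw [if_neg hnlt, if_pos hgt]
      push_cast; ring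
  | case6 lo hi offset size hle h2 half mid left right hnlt hngt =>
    intro hhi
    simp only [size] at hle h2
    by_cases hp : (hi - lo) % 2 = 0 <;>
    [ simp only [size, half, mid, left, right, hp, dite_true] at hnlt hngt;
      simp only [size, half, mid, left, right, hp, dite_false] at hnlt hngt ] <;>
    · rw [walnutLoop, if_neg hle, if_neg h2]
      simp only [hp, ite_true, ite_false]
      rw [if_neg hnlt, if_neg hngt, A_window w lo hi hhi (by omega)]
      simp only [hp, ite_true, ite_false]
      rw [if_neg hnlt, if_neg hngt]

-- ===== VERDICT (by name: the statement is the Claim_ definition above) =====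
theorem indexOfRottenWalnut_spec : Claim_equal_indexOfRottenWalnut := by
  intro wList _
  unfold Spec_indexOfRottenWalnut indexOfRottenWalnut_alt
  rw [walnutLoop_eq wList 0 wList.length 0 le_rfl]
  simp
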